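-- pv_equiv track=rewrite | github.com/disputestrike/RELEASE-CRUCIB-2026 | backend/context_manager.py | summarize_output
-- ===== SOURCE A (Python) =====
-- def summarize_output(output: str, max_length: int = 500) -> str:
--     """
--     Summarize agent output for storage/display.
--
--     Returns: Summarized output
--     """
--     if len(output) <= max_length:
--         return output
--
--     # Try to keep complete lines
--     lines = output.split('\n')
--     summary = []
--     current_length = 0
--
--     for line in lines:
--         if current_length + len(line) + 1 <= max_length:
--             summary.append(line)
--             current_length += len(line) + 1
--         else:
--             break
--
--     return '\n'.join(summary) + f"\n... ({len(output) - current_length} chars truncated)"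
-- ===== SOURCE B (Python) =====
-- def summarize_output(output: str, max_length: int = 500) -> str:
--     """Summarize agent output for storage/display (prefix sums + binary search)."""
--     if len(output) <= max_length:
--         return output
--
--     lines = output.split('\n')
--     # cumulative[i] = total length of lines[0..i] joined with '\n' plus one trailing unit
--     cumulative = []
--     total = 0
--     for line in lines:
--         total += len(line) + 1
--         cumulative.append(total)
--
--     # binary search for the number of whole lines that fit in max_length
--     lo, hi = 0, len(cumulative)
--     while lo < hi:
--         mid = (lo + hi) // 2
--         if cumulative[mid] <= max_length:
--             lo = mid + 1
--         else:
--             hi = mid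
--     count = lo
--
--     current_length = cumulative[count - 1] if count else 0
--     return '\n'.join(lines[:count]) + f"\n... ({len(output) - current_length} chars truncated)"
-- ===== Notes on version B (the rewrite author's own statement) =====
-- stated objective: alternative
-- what changed: Replaces A's greedy accumulate-until-overflow loop over the lines by building a prefix-sum table of line lengths once and binary-searching it for the number of whole lines that fit.
import Mathlib
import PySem

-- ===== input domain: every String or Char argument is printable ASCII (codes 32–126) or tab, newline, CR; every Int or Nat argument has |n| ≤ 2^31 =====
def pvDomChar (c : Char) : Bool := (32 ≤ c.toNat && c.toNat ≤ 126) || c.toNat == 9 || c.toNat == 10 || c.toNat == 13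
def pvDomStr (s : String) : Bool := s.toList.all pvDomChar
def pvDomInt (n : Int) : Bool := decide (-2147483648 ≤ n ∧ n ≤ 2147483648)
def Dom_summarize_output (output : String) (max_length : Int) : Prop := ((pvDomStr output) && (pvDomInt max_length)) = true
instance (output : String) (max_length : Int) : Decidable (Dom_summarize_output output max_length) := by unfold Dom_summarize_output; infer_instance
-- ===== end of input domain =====

-- B replaces A's greedy accumulate-until-overflow loop by a prefix-sum table plus a
-- binary search for the number of whole lines that fit (objective: alternative).

-- ===== PORT A =====
-- the for-loop with break: state (summary, current_length)
def pvLoopA (ml : Int) : List String → List String → Int → (List String × Int)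
  | [], summ, cl => (summ, cl)
  | line :: rest, summ, cl =>
    if cl + PySem.Str.len line + 1 ≤ ml then
      pvLoopA ml rest (summ ++ [line]) (cl + PySem.Str.len line + 1)
    else (summ, cl)

def summarize_output (output : String) (max_length : Int) : String :=
  if PySem.Str.len output ≤ max_length then output
  else
    let lines := (PySem.Str.split? output "\n").getD []   -- sep "\n" ≠ "", so split? is always some
    let (summary, current_length) := pvLoopA max_length lines [] 0
    PySem.Str.join "\n" summary ++
      ("\n... (" ++ PySem.Int.toStr (PySem.Str.len output - current_length) ++ " chars truncated)")

-- ===== PORT B =====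
-- the prefix-sum building loop: state (cumulative, total)
def pvBuildCum : List String → List Int × Int → List Int × Int
  | [], acc => acc
  | line :: rest, (cum, total) =>
    pvBuildCum rest (cum ++ [total + PySem.Str.len line + 1], total + PySem.Str.len line + 1)

-- the 'while lo < hi' binary search (cumulative[mid] is always in range here)
def pvBsearch (cum : List Int) (ml : Int) (lo hi : Nat) : Nat :=
  if _h : lo < hi then
    let mid := (lo + hi) / 2
    if PySem.List.pyGetD cum (mid : Int) 0 ≤ ml then pvBsearch cum ml (mid + 1) hi
    else pvBsearch cum ml lo mid
  else lo
termination_by hi - lo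
decreasing_by all_goals omega

def summarize_output_alt (output : String) (max_length : Int) : String :=
  if PySem.Str.len output ≤ max_length then output
  else
    let lines := (PySem.Str.split? output "\n").getD []
    let cum := (pvBuildCum lines ([], 0)).1
    let count := pvBsearch cum max_length 0 cum.length
    let current_length := if count = 0 then 0 else PySem.List.pyGetD cum ((count : Int) - 1) 0
    PySem.Str.join "\n" (PySem.List.slice lines none (some (count : Int))) ++
      ("\n... (" ++ PySem.Int.toStr (PySem.Str.len output - current_length) ++ " chars truncated)")

-- ===== PRECONDITION & SPEC =====
def Spec_summarize_output (output : String) (max_length : Int) (out : String) : Prop := out = summarize_output_alt output max_length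
instance (output : String) (max_length : Int) (out : String) : Decidable (Spec_summarize_output output max_length out) := by unfold Spec_summarize_output; infer_instance

-- ===== CLAIM (what is proved, stated in full; the proofs are below) =====
def Claim_equal_summarize_output : Prop := ∀ (output : String) (max_length : Int), Dom_summarize_output output max_length → Spec_summarize_output output max_length (summarize_output output max_length)

-- ===== LEMMAS AND PROOFS =====

-- prefix sums of len(line)+1 starting from base cl
def pvCumFrom (cl : Int) : List String → List Int
  | [] => []
  | line :: rest => (cl + PySem.Str.len line + 1) :: pvCumFrom (cl + PySem.Str.len line + 1) rest

-- number of prefix sums ≤ ml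
def pvCnt (cum : List Int) (ml : Int) : Nat := (cum.takeWhile (fun c => decide (c ≤ ml))).length

-- pvCnt is the unique r with "everything below r fits, position r (if any) does not"
theorem pvCnt_eq (cum : List Int) (ml : Int) (r : Nat) (hr : r ≤ cum.length)
    (hlt : ∀ i (h : i < cum.length), i < r → cum[i] ≤ ml)
    (hge : ∀ h : r < cum.length, ml < cum[r]) : pvCnt cum ml = r := by
  induction cum generalizing r with
  | nil => simp only [List.length_nil] at hr; simp [pvCnt]; omega
  | cons c cs ih =>
    cases r with
    | zero =>
      have := hge (by simp)
      simp only [List.getElem_cons_zero] at this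
      simp only [pvCnt, List.takeWhile, decide_eq_false (not_le.mpr this), List.length_nil]
    | succ r' =>
      have hc : c ≤ ml := by
        have := hlt 0 (by simp) (by omega); simpa using this
      simp only [pvCnt, List.takeWhile, decide_eq_true hc, List.length_cons]
      have : pvCnt cs ml = r' := by
        apply ih r' (by simpa using hr)
        · intro i h hi
          have := hlt (i + 1) (by simpa using Nat.succ_lt_succ h) (by omega)
          simpa using this
        · intro h
          have := hge (by simpa using Nat.succ_lt_succ h)
          simpa using this
      simpa [pvCnt] using this

-- A's loop computes the pvCnt-prefix and the matching cumulative length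
theorem pvLoopA_eq (ml : Int) (lines : List String) : ∀ (acc : List String) (cl : Int),
    pvLoopA ml lines acc cl =
      (acc ++ lines.take (pvCnt (pvCumFrom cl lines) ml),
       if pvCnt (pvCumFrom cl lines) ml = 0 then cl
       else (pvCumFrom cl lines).getD (pvCnt (pvCumFrom cl lines) ml - 1) 0) := by
  induction lines with
  | nil => intro acc cl; simp [pvLoopA, pvCumFrom, pvCnt]
  | cons line rest ih =>
    intro acc cl
    by_cases h : cl + PySem.Str.len line + 1 ≤ ml
    · rw [pvLoopA, if_pos h, ih]
      have hcnt : pvCnt (pvCumFrom cl (line :: rest)) ml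
          = pvCnt (pvCumFrom (cl + PySem.Str.len line + 1) rest) ml + 1 := by
        simp only [pvCumFrom, pvCnt, List.takeWhile, decide_eq_true h, List.length_cons]
      rw [hcnt]
      cases hk : pvCnt (pvCumFrom (cl + PySem.Str.len line + 1) rest) ml with
      | zero => simp [pvCumFrom]
      | succ k => simp [pvCumFrom]
    · rw [pvLoopA, if_neg h]
      have hcnt : pvCnt (pvCumFrom cl (line :: rest)) ml = 0 := by
        simp only [pvCumFrom, pvCnt, List.takeWhile, decide_eq_false h, List.length_nil]
      simp [hcnt]

-- every entry of pvCumFrom cl is > cl, and the list is nondecreasing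
theorem pvCumFrom_gt (cl : Int) (lines : List String) : ∀ x ∈ pvCumFrom cl lines, cl < x := by
  induction lines generalizing cl with
  | nil => simp [pvCumFrom]
  | cons line rest ih =>
    intro x hx
    have hlen : 0 ≤ PySem.Str.len line := by rw [PySem.Str.len_eq]; positivity
    simp only [pvCumFrom, List.mem_cons] at hx
    rcases hx with h | h
    · omega
    · have := ih (cl + PySem.Str.len line + 1) x h; omega

theorem pvCumFrom_pairwise (cl : Int) (lines : List String) :
    List.Pairwise (· ≤ ·) (pvCumFrom cl lines) := by
  induction lines generalizing cl with
  | nil => simp [pvCumFrom]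
  | cons line rest ih =>
    simp only [pvCumFrom, List.pairwise_cons]
    exact ⟨fun x hx => le_of_lt (pvCumFrom_gt _ _ x hx), ih _⟩

theorem pvCumFrom_mono (cl : Int) (lines : List String) {i j : Nat}
    (hi : i < (pvCumFrom cl lines).length) (hj : j < (pvCumFrom cl lines).length)
    (hij : i ≤ j) : (pvCumFrom cl lines)[i] ≤ (pvCumFrom cl lines)[j] := by
  rcases Nat.eq_or_lt_of_le hij with rfl | h
  · exact le_refl _
  · exact (List.pairwise_iff_getElem.mp (pvCumFrom_pairwise cl lines)) i j hi hj h

-- the binary search returns pvCnt on a nondecreasing list, given the bisect invariant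
theorem pvBsearch_eq (cum : List Int) (ml : Int)
    (hmono : ∀ i j (hi : i < cum.length) (hj : j < cum.length), i ≤ j → cum[i] ≤ cum[j]) :
    ∀ (n lo hi : Nat), hi - lo ≤ n → lo ≤ hi → hi ≤ cum.length →
    (∀ i (h : i < cum.length), i < lo → cum[i] ≤ ml) →
    (∀ i (h : i < cum.length), hi ≤ i → ml < cum[i]) →
    pvBsearch cum ml lo hi = pvCnt cum ml := by
  intro n
  induction n with
  | zero =>
    intro lo hi hfuel hlohi hhile hlo hhi
    have heq : lo = hi := by omega
    subst heq
    rw [pvBsearch, dif_neg (by omega)]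
    exact (pvCnt_eq cum ml lo hhile (fun i h1 h2 => hlo i h1 h2)
      (fun hlt => hhi lo hlt (le_refl _))).symm
  | succ n ih =>
    intro lo hi hfuel hlohi hhile hlo hhi
    by_cases h : lo < hi
    · rw [pvBsearch, dif_pos h]
      show (if PySem.List.pyGetD cum (((lo + hi) / 2 : Nat) : Int) 0 ≤ ml
            then pvBsearch cum ml ((lo + hi) / 2 + 1) hi
            else pvBsearch cum ml lo ((lo + hi) / 2)) = pvCnt cum ml
      have hmidlt : (lo + hi) / 2 < cum.length := by omega
      have hget : PySem.List.pyGetD cum (((lo + hi) / 2 : Nat) : Int) 0 = cum[(lo + hi) / 2] := by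
        rw [PySem.List.pyGetD_natCast]
        simp [List.getD, List.getElem?_eq_getElem hmidlt]
      rw [hget]
      by_cases hm : cum[(lo + hi) / 2] ≤ ml
      · rw [if_pos hm]
        exact ih ((lo + hi) / 2 + 1) hi (by omega) (by omega) hhile
          (fun i hilen hi2 => le_trans (hmono i _ hilen hmidlt (by omega)) hm) hhi
      · rw [if_neg hm]
        exact ih lo ((lo + hi) / 2) (by omega) (by omega) (by omega) hlo
          (fun i hilen hi2 => lt_of_lt_of_le (not_le.mp hm) (hmono _ i hmidlt hilen hi2))
    · rw [pvBsearch, dif_neg h]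
      have heq : lo = hi := by omega
      subst heq
      exact (pvCnt_eq cum ml lo hhile (fun i h1 h2 => hlo i h1 h2)
        (fun hlt => hhi lo hlt (le_refl _))).symm

-- B's building loop produces exactly the prefix-sum list
theorem pvBuildCum_fst (lines : List String) : ∀ (cum : List Int) (t : Int),
    (pvBuildCum lines (cum, t)).1 = cum ++ pvCumFrom t lines := by
  induction lines with
  | nil => intro cum t; simp [pvBuildCum, pvCumFrom]
  | cons line rest ih =>
    intro cum t
    rw [pvBuildCum, ih]
    simp [pvCumFrom]

-- ===== VERDICT (by name: the statement is the Claim_ definition above) =====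
theorem summarize_output_spec : Claim_equal_summarize_output := by
  intro output max_length _hdom
  unfold Spec_summarize_output summarize_output summarize_output_alt
  split_ifs with h
  · rfl
  · have hcount : ∀ lines : List String,
        pvBsearch (pvCumFrom 0 lines) max_length 0 (pvCumFrom 0 lines).length
          = pvCnt (pvCumFrom 0 lines) max_length := by
      intro lines
      apply pvBsearch_eq _ _ (fun i j hi hj hij => pvCumFrom_mono 0 lines hi hj hij)
        (pvCumFrom 0 lines).length 0 _ (by omega) (Nat.zero_le _) (le_refl _)
      · intro i _ hi0; omega
      · intro i hlt hge; omega
    have hcur : ∀ lines : List String,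
        (if pvCnt (pvCumFrom 0 lines) max_length = 0 then (0 : Int)
         else PySem.List.pyGetD (pvCumFrom 0 lines)
           ((pvCnt (pvCumFrom 0 lines) max_length : Int) - 1) 0)
        = (if pvCnt (pvCumFrom 0 lines) max_length = 0 then (0 : Int)
           else (pvCumFrom 0 lines).getD (pvCnt (pvCumFrom 0 lines) max_length - 1) 0) := by
      intro lines
      cases hk : pvCnt (pvCumFrom 0 lines) max_length with
      | zero => rfl
      | succ k' =>
        simp [PySem.List.pyGetD_natCast]
    simp only [pvBuildCum_fst, List.nil_append, hcount, pvLoopA_eq,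
      PySem.List.slice_to_natCast, hcur]
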